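-- pv_equiv track=rewrite | github.com/HackerOS-Linux-System/HackerScript | source-code/Fresh-Compiler/main.py | process_interpolation
-- ===== SOURCE A (Python) =====
-- def process_interpolation(s):
--     s = s[1:-1] # remove quotes
--     if '{' not in s:
--         return f'"{s}"'
--     parts = []
--     vars = []
--     current = ''
--     i = 0
--     while i < len(s):
--         if s[i] == '{':
--             if current:
--                 parts.append(current)
--             current = ''
--             i += 1
--             var = ''
--             while i < len(s) and s[i] != '}':
--                 var += s[i]
--                 i += 1
--             i += 1 # skip }
--             vars.append(var.strip())
--             parts.append("%s")
--         else:
--             current += s[i]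
--             i += 1
--     if current:
--         parts.append(current)
--     format_str = ''.join(parts)
--     args = ', '.join(vars)
--     return f'(char*)({{ char *str = NULL; asprintf(&str, "{format_str}", {args}); str; }})'
-- ===== SOURCE B (Python) =====
-- def process_interpolation(s):
--     s = s[1:-1]  # remove quotes
--     if '{' not in s:
--         return f'"{s}"'
--     fmt = ''
--     args_list = []
--     rest = s
--     while True:
--         lit, brace, rest = rest.partition('{')
--         fmt += lit
--         if not brace:
--             break
--         var, _, rest = rest.partition('}')
--         args_list.append(var.strip())
--         fmt += '%s'
--     args = ', '.join(args_list)
--     return f'(char*)({{ char *str = NULL; asprintf(&str, "{fmt}", {args}); str; }})'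
-- ===== Notes on version B (the rewrite author's own statement) =====
-- stated objective: idiomatic
-- what changed: Replaced A's char-by-char index loop with a nested inner while and a parts/current accumulator by a chunk-wise loop using str.partition on the opening and closing brace, appending whole literal chunks to the format string at once.
import Mathlib
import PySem

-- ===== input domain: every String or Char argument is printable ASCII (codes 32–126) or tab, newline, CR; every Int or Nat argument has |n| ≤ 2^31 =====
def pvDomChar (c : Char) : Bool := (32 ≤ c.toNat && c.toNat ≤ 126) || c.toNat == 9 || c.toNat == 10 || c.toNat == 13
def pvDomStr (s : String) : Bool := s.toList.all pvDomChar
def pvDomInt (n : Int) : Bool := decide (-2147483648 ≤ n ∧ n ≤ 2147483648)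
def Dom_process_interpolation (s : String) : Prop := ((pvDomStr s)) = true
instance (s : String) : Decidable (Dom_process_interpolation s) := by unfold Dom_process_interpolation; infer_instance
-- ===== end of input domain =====

-- B replaces A's char-by-char scan (inner while for each '{…}') by a chunk-wise
-- partition loop; same return value, no speed claim.

-- ===== PORT A =====
-- inner `while i < len(s) and s[i] != '}': var += s[i]; i += 1` followed by `i += 1`:
-- returns (var, remaining input after the skipped '}').
def aVar : List Char → List Char × List Char
  | [] => ([], [])
  | c :: rest =>
    if c = '}' then ([], rest)
    else
      let p := aVar rest
      (c :: p.1, p.2)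

theorem aVar_len : ∀ cs : List Char, (aVar cs).2.length ≤ cs.length := by
  intro cs
  induction cs with
  | nil => simp [aVar]
  | cons c rest ih =>
    simp only [aVar]
    split
    · simp
    · simpa using Nat.le_succ_of_le ih

-- the outer `while i < len(s)` of A, state = (parts, vars, current)
def aLoop : List Char → List (List Char) → List (List Char) → List Char →
    List (List Char) × List (List Char)
  | [], parts, vars, current =>
    ((if current ≠ [] then parts ++ [current] else parts), vars)
  | c :: rest, parts, vars, current =>
    if c = '{' then
      let parts1 := if current ≠ [] then parts ++ [current] else parts
      let p := aVar rest
      aLoop p.2 (parts1 ++ [['%', 's']]) (vars ++ [PySem.Chars.strip p.1]) []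
    else
      aLoop rest parts vars (current ++ [c])
termination_by cs _ _ _ => cs.length
decreasing_by
  · exact Nat.lt_succ_of_le (aVar_len rest)
  · simp

def process_interpolation (s : String) : String :=
  let cs := PySem.Chars.slice s.toList (some 1) (some (-1))  -- s = s[1:-1]
  if ¬ ('{' ∈ cs) then String.ofList ('"' :: cs ++ ['"'])
  else
    let r := aLoop cs [] [] []
    let format_str := r.1.flatten                             -- ''.join(parts)
    let args := PySem.Chars.join [',', ' '] r.2               -- ', '.join(vars)
    String.ofList ("(char*)({ char *str = NULL; asprintf(&str, \"".toList
      ++ format_str ++ "\", ".toList ++ args ++ "); str; })".toList)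

-- ===== PORT B =====
-- the `while True` partition loop of B: partition('{') = (takeWhile, dropWhile),
-- then partition('}') on the remainder; state = (fmt, vars)
def bLoop (cs : List Char) (fmt : List Char) (vars : List (List Char)) :
    List Char × List (List Char) :=
  match h : cs.dropWhile (· ≠ '{') with
  | [] => (fmt ++ cs.takeWhile (· ≠ '{'), vars)
  | _ :: r1 =>
    bLoop ((r1.dropWhile (· ≠ '}')).drop 1)
      (fmt ++ cs.takeWhile (· ≠ '{') ++ ['%', 's'])
      (vars ++ [PySem.Chars.strip (r1.takeWhile (· ≠ '}'))])
termination_by cs.length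
decreasing_by
  have h1 : (cs.dropWhile (· ≠ '{')).length ≤ cs.length := cs.length_dropWhile_le _
  have h2 : (r1.dropWhile (· ≠ '}')).length ≤ r1.length := r1.length_dropWhile_le _
  have h3 : ((r1.dropWhile (· ≠ '}')).drop 1).length ≤ (r1.dropWhile (· ≠ '}')).length := by
    simp
  rw [h] at h1
  simp at h1
  omega

def process_interpolation_alt (s : String) : String :=
  let cs := PySem.Chars.slice s.toList (some 1) (some (-1))  -- s = s[1:-1]
  if ¬ ('{' ∈ cs) then String.ofList ('"' :: cs ++ ['"'])
  else
    let r := bLoop cs [] []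
    let args := PySem.Chars.join [',', ' '] r.2               -- ', '.join(vars)
    String.ofList ("(char*)({ char *str = NULL; asprintf(&str, \"".toList
      ++ r.1 ++ "\", ".toList ++ args ++ "); str; })".toList)

-- ===== PRECONDITION & SPEC =====
def Spec_process_interpolation (s : String) (out : String) : Prop := out = process_interpolation_alt s
instance (s : String) (out : String) : Decidable (Spec_process_interpolation s out) := by unfold Spec_process_interpolation; infer_instance

-- ===== CLAIM (what is proved, stated in full; the proofs are below) =====
def Claim_equal_process_interpolation : Prop := ∀ (s : String), Dom_process_interpolation s → Spec_process_interpolation s (process_interpolation s)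

-- ===== LEMMAS AND PROOFS =====

-- common characterisation of both loops: the (format chars, vars) both produce
def pvSpec : List Char → List Char × List (List Char)
  | [] => ([], [])
  | c :: cs =>
    if c = '{' then
      let p := aVar cs
      let q := pvSpec p.2
      (['%', 's'] ++ q.1, PySem.Chars.strip p.1 :: q.2)
    else
      let q := pvSpec cs
      (c :: q.1, q.2)
termination_by cs => cs.length
decreasing_by
  · exact Nat.lt_succ_of_le (aVar_len cs)
  · simp

theorem aVar_eq (cs : List Char) :
    aVar cs = (cs.takeWhile (· ≠ '}'), (cs.dropWhile (· ≠ '}')).drop 1) := by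
  induction cs with
  | nil => simp [aVar]
  | cons c rest ih =>
    by_cases hc : c = '}'
    · simp [aVar, hc]
    · simp [aVar, hc, ih]

theorem aLoop_spec (cs : List Char) : ∀ parts vars current,
    (aLoop cs parts vars current).1.flatten
        = parts.flatten ++ current ++ (pvSpec cs).1
      ∧ (aLoop cs parts vars current).2 = vars ++ (pvSpec cs).2 := by
  induction cs using pvSpec.induct with
  | case1 =>
    intro parts vars current
    by_cases hc : current = [] <;> simp [aLoop, pvSpec, hc]
  | case2 rest p ih =>
    intro parts vars current
    have hp : p = aVar rest := rfl
    rw [hp] at ih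
    simp only [aLoop, pvSpec, reduceIte]
    constructor
    · rw [(ih _ _ _).1]
      by_cases hcur : current = [] <;> simp [hcur]
    · rw [(ih _ _ _).2]; simp
  | case3 c rest hc ih =>
    intro parts vars current
    simp only [aLoop, pvSpec, if_neg hc]
    constructor
    · rw [(ih _ _ _).1]; simp
    · exact (ih _ _ _).2

theorem pvSpec_chunk (cs : List Char) :
    pvSpec cs =
      match cs.dropWhile (· ≠ '{') with
      | [] => (cs.takeWhile (· ≠ '{'), [])
      | _ :: r1 =>
        (cs.takeWhile (· ≠ '{') ++ ['%', 's']
            ++ (pvSpec ((r1.dropWhile (· ≠ '}')).drop 1)).1,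
         PySem.Chars.strip (r1.takeWhile (· ≠ '}'))
            :: (pvSpec ((r1.dropWhile (· ≠ '}')).drop 1)).2) := by
  induction cs with
  | nil => simp [pvSpec]
  | cons c rest ih =>
    by_cases hc : c = '{'
    · simp [pvSpec, hc, aVar_eq]
    · simp only [List.takeWhile_cons, List.dropWhile_cons]
      simp only [hc, decide_true, if_true, ne_eq, not_false_iff]
      rw [pvSpec, if_neg hc, ih]
      cases h : rest.dropWhile (· ≠ '{') <;> simp

theorem bLoop_spec (cs fmt : List Char) (vars : List (List Char)) :
    bLoop cs fmt vars = (fmt ++ (pvSpec cs).1, vars ++ (pvSpec cs).2) := by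
  induction cs, fmt, vars using bLoop.induct with
  | case1 cs fmt vars h =>
    rw [pvSpec_chunk cs]
    simp only [h]
    rw [bLoop]
    split
    · simp
    · rename_i heq
      rw [h] at heq
      cases heq
  | case2 cs fmt vars head r1 h ih =>
    rw [pvSpec_chunk cs]
    simp only [h]
    rw [bLoop]
    split
    · rename_i heq
      rw [h] at heq
      cases heq
    · rename_i heq
      rw [h] at heq
      injection heq with h1 h2
      subst h2
      rw [ih]
      simp

-- ===== VERDICT (by name: the statement is the Claim_ definition above) =====
theorem process_interpolation_spec : Claim_equal_process_interpolation := by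
  intro s _
  unfold Spec_process_interpolation process_interpolation process_interpolation_alt
  set cs := PySem.Chars.slice s.toList (some 1) (some (-1)) with hcs
  by_cases hb : '{' ∈ cs
  · simp only [hb, not_true, if_false]
    rw [bLoop_spec]
    have ha := aLoop_spec cs [] [] []
    simp only [List.flatten_nil, List.nil_append] at ha
    rw [ha.1, ha.2]
    simp
  · simp [hb]
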